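-- pv_equiv track=rewrite | github.com/VladOgai/csmipt | 2nd semester/2nd week/p2.py | tree_w_gcd
-- ===== SOURCE A (Python) =====
-- from math import gcd
--
-- def tree_w_gcd(tree: list[list[int]]) -> list[int]:
--     restree = [None] * len(tree)
--     for i in range(len(tree) - 1, -1, -1):
--         if tree[i] is None:
--             continue
--         elif len(tree[i]) == 1:
--             restree[i] = tree[i][0]
--             continue
--         a = restree[2 * i + 1]
--         b = restree[2 * i + 2]
--         if a is None and b is not None:
--             restree[i] = b
--         elif b is None and a is not None:
--             restree[i] = a
--         elif a is None and b is None: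
--             restree[i] = None
--         else:
--             restree[i] = gcd(a, b)
--     return restree
-- ===== SOURCE B (Python) =====
-- from math import gcd
--
-- def tree_w_gcd(tree):
--     def solve(i):
--         node = tree[i]
--         if node is None:
--             return None
--         if len(node) == 1:
--             return node[0]
--         a = solve(2 * i + 1)
--         b = solve(2 * i + 2)
--         if a is None:
--             return b
--         if b is None:
--             return a
--         return gcd(a, b)
--     return [solve(i) for i in range(len(tree))]
-- ===== Notes on version B (the rewrite author's own statement) =====
-- stated objective: alternative
-- what changed: Replaces A's backward in-place array sweep (bottom-up DP over restree) with a pure top-down recursion solve(i) over the implicit heap, mapped over all indices; no result array is mutated.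
import Mathlib
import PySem

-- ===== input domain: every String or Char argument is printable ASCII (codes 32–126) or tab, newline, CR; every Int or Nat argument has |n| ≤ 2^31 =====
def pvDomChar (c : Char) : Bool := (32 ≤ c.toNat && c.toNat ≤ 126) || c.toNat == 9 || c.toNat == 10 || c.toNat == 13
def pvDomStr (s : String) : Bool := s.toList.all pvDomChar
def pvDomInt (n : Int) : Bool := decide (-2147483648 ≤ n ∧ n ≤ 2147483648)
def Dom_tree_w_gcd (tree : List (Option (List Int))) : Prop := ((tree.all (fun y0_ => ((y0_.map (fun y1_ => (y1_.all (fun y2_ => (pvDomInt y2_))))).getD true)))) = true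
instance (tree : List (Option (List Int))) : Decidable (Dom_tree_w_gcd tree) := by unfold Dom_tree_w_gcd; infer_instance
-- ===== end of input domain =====

-- B replaces A's bottom-up array sweep by a pure top-down recursion per index (objective: alternative decomposition, same results).

-- ===== PORT A =====
-- one iteration of A's loop body at index i
def pvStepA (tree : List (Option (List Int))) (restree : List (Option Int)) (i : Nat) : List (Option Int) :=
  match tree.getD i none with
  | none => restree
  | some l =>
    if l.length = 1 then restree.set i (some (l.getD 0 0))
    else
      let a := restree.getD (2 * i + 1) none   -- out-of-range read raises IndexError in Python; excluded by Pre_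
      let b := restree.getD (2 * i + 2) none
      match a, b with
      | none, some b' => restree.set i (some b')
      | some a', none => restree.set i (some a')
      | none, none => restree.set i none
      | some a', some b' => restree.set i (some (Int.gcd a' b'))

-- the loop 'for i in range(len(tree)-1, -1, -1)': processes indices i-1, i-2, …, 0
def pvLoopA (tree : List (Option (List Int))) : Nat → List (Option Int) → List (Option Int)
  | 0, r => r
  | i + 1, r => pvLoopA tree i (pvStepA tree r (i))

def tree_w_gcd (tree : List (Option (List Int))) : List (Option Int) :=
  pvLoopA tree tree.length (List.replicate tree.length none)

-- ===== PORT B =====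
-- B's helper solve(i): pure recursion down the implicit heap
def pvSolveB (tree : List (Option (List Int))) (i : Nat) : Option Int :=
  if h : i < tree.length then
    match tree[i] with
    | none => none
    | some node =>
      if node.length = 1 then some (node.getD 0 0)
      else
        let a := pvSolveB tree (2 * i + 1)
        let b := pvSolveB tree (2 * i + 2)
        match a with
        | none => b
        | some a' =>
          match b with
          | none => some a'
          | some b' => some (Int.gcd a' b')
  else none   -- in Python B an out-of-range i raises IndexError; such inputs are excluded by Pre_
termination_by tree.length - i
decreasing_by all_goals omega

def tree_w_gcd_alt (tree : List (Option (List Int))) : List (Option Int) :=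
  (List.range tree.length).map (pvSolveB tree)

-- ===== PRECONDITION & SPEC =====
-- Pre_ excludes exactly the inputs where A raises IndexError: an internal node (non-None, length ≠ 1)
-- whose child index 2*i+2 falls outside the list.
def Pre_tree_w_gcd (tree : List (Option (List Int))) : Prop :=
  ∀ i < tree.length,
    (match tree.getD i none with
     | none => false
     | some l => l.length != 1) = true → 2 * i + 2 < tree.length
instance (tree : List (Option (List Int))) : Decidable (Pre_tree_w_gcd tree) := by unfold Pre_tree_w_gcd; infer_instance

def pvWitness_tree_w_gcd : List (Option (List Int)) := [some [6, 0], some [4], some [10]]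

def Spec_tree_w_gcd (tree : List (Option (List Int))) (out : List (Option Int)) : Prop := out = tree_w_gcd_alt tree
instance (tree : List (Option (List Int))) (out : List (Option Int)) : Decidable (Spec_tree_w_gcd tree out) := by unfold Spec_tree_w_gcd; infer_instance

-- ===== CLAIM (what is proved, stated in full; the proofs are below) =====
def Claim_equal_tree_w_gcd : Prop := ∀ (tree : List (Option (List Int))), Dom_tree_w_gcd tree → Pre_tree_w_gcd tree → Spec_tree_w_gcd tree (tree_w_gcd tree)

-- ===== LEMMAS AND PROOFS =====

theorem pvStepA_length (tree : List (Option (List Int))) (r : List (Option Int)) (i : Nat) :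
    (pvStepA tree r i).length = r.length := by
  unfold pvStepA
  cases htree : tree.getD i none with
  | none => rfl
  | some l =>
    dsimp only
    by_cases hl : l.length = 1
    · rw [if_pos hl]; simp
    · rw [if_neg hl]
      cases r.getD (2 * i + 1) none <;> cases r.getD (2 * i + 2) none <;> simp

theorem pv_getD_set_self (r : List (Option Int)) (i : Nat) (h : i < r.length) (v : Option Int) :
    (r.set i v).getD i none = v := by
  simp [List.getD, h]

theorem pv_getD_set_ne (r : List (Option Int)) (i j : Nat) (h : i ≠ j) (v : Option Int) :
    (r.set i v).getD j none = r.getD j none := by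
  simp [List.getD, List.getElem?_set_ne h]

-- key invariant: running the loop from index i downward, with positions ≥ i already holding
-- solve's values and positions < i still none, yields solve's values everywhere
theorem pvLoopA_inv (tree : List (Option (List Int))) (hpre : Pre_tree_w_gcd tree) :
    ∀ (i : Nat), i ≤ tree.length → ∀ (r : List (Option Int)), r.length = tree.length →
      (∀ j, i ≤ j → j < tree.length → r.getD j none = pvSolveB tree j) →
      (∀ j, j < i → r.getD j none = none) →
      ∀ k, k < tree.length → (pvLoopA tree i r).getD k none = pvSolveB tree k := by
  intro i
  induction i with
  | zero =>
    intro _ r _ hhi _ k hk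
    exact hhi k (Nat.zero_le k) hk
  | succ i ih =>
    intro hle r hlen hhi hlo k hk
    have hi : i < tree.length := Nat.lt_of_succ_le hle
    have hri : i < r.length := by rw [hlen]; exact hi
    have hlen' : (pvStepA tree r i).length = tree.length := by rw [pvStepA_length, hlen]
    -- the effect of A's step at index i, expressed through B's solve
    have hset : ∀ j, j < tree.length →
        (pvStepA tree r i).getD j none = if j = i then pvSolveB tree i else r.getD j none := by
      intro j hj
      unfold pvStepA
      cases htree : tree.getD i none with
      | none =>
        have htree' : tree[i] = none := by
          have := htree; simpa [List.getD, List.getElem?_eq_getElem hi] using this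
        by_cases hji : j = i
        · subst hji
          rw [if_pos rfl, hlo j (Nat.lt_succ_self _), pvSolveB]
          simp [hj, htree']
        · rw [if_neg hji]
      | some l =>
        have htree' : tree[i] = some l := by
          have := htree; simpa [List.getD, List.getElem?_eq_getElem hi] using this
        dsimp only
        by_cases hl : l.length = 1
        · rw [if_pos hl]
          by_cases hji : j = i
          · subst hji
            rw [if_pos rfl, pv_getD_set_self r j hri, pvSolveB]
            simp [hj, htree', hl]
          · rw [if_neg hji, pv_getD_set_ne r i j (fun h => hji h.symm)]
        · rw [if_neg hl]
          have hchild : 2 * i + 2 < tree.length := by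
            apply hpre i hi
            rw [htree]; simpa using hl
          have ha : r.getD (2 * i + 1) none = pvSolveB tree (2 * i + 1) :=
            hhi _ (by omega) (by omega)
          have hb : r.getD (2 * i + 2) none = pvSolveB tree (2 * i + 2) :=
            hhi _ (by omega) (by omega)
          have hsolve : pvSolveB tree i =
              (match pvSolveB tree (2 * i + 1) with
               | none => pvSolveB tree (2 * i + 2)
               | some a' =>
                 match pvSolveB tree (2 * i + 2) with
                 | none => some a'
                 | some b' => some (Int.gcd a' b')) := by
            rw [pvSolveB]; simp [hi, htree', hl]
          by_cases hji : j = i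
          · subst hji
            rw [if_pos rfl, hsolve, ← ha, ← hb]
            cases r.getD (2 * j + 1) none <;> cases r.getD (2 * j + 2) none <;>
              exact pv_getD_set_self r j hri _
          · rw [if_neg hji]
            cases r.getD (2 * i + 1) none <;> cases r.getD (2 * i + 2) none <;>
              exact pv_getD_set_ne r i j (fun h => hji h.symm) _
    rw [show pvLoopA tree (i + 1) r = pvLoopA tree i (pvStepA tree r i) from rfl]
    refine ih (Nat.le_of_lt hle) (pvStepA tree r i) hlen' ?_ ?_ k hk
    · intro j hj1 hj2
      rw [hset j hj2]
      rcases Nat.eq_or_lt_of_le hj1 with heq | hgt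
      · rw [if_pos heq.symm]; rw [heq]
      · rw [if_neg (by omega)]
        exact hhi j (by omega) hj2
    · intro j hj
      rw [hset j (by omega), if_neg (by omega)]
      exact hlo j (by omega)

theorem pvLoopA_length (tree : List (Option (List Int))) :
    ∀ (i : Nat) (r : List (Option Int)), (pvLoopA tree i r).length = r.length := by
  intro i
  induction i with
  | zero => intro r; rfl
  | succ i ih => intro r; rw [pvLoopA, ih, pvStepA_length]

-- ===== VERDICT (by name: the statement is the Claim_ definition above) =====
theorem tree_w_gcd_spec : Claim_equal_tree_w_gcd := by
  intro tree _ hpre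
  unfold Spec_tree_w_gcd tree_w_gcd tree_w_gcd_alt
  have hlenA : (pvLoopA tree tree.length (List.replicate tree.length none)).length = tree.length := by
    rw [pvLoopA_length]; simp
  apply List.ext_getElem
  · simp [hlenA]
  · intro k hk1 hk2
    have hk : k < tree.length := by simpa [hlenA] using hk1
    have hinv := pvLoopA_inv tree hpre tree.length (Nat.le_refl _)
      (List.replicate tree.length none) (by simp)
      (fun j hj1 hj2 => absurd hj2 (Nat.not_lt_of_le hj1))
      (fun j hj => by simp [List.getD, hj])
      k hk
    have hget : (pvLoopA tree tree.length (List.replicate tree.length none)).getD k none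
        = (pvLoopA tree tree.length (List.replicate tree.length none))[k] := by
      simp [List.getD, List.getElem?_eq_getElem hk1]
    rw [← hget, hinv]
    simp [List.getElem_map, List.getElem_range]
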